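-- pv_equiv track=rewrite | github.com/harmening/signature_extraction | signature_extractor/preprocessing/feature_parser.py | is_in_last_five_lines
-- ===== SOURCE A (Python) =====
-- def is_in_last_five_lines(text, line):
--     try:
--         lines = text.split('\n')
--         lines = [l.strip() for l in lines if len(l) > 0]
--         line_index = max([i for i, l in enumerate(lines) if line in l])
--         output = True if len(lines) - 6 < line_index else False
--     except:
--         output = False
--     return output
-- ===== SOURCE B (Python) =====
-- def is_in_last_five_lines(text, line):
--     try:
--         lines = [l.strip() for l in text.split('\n') if len(l) > 0]
--         return any(line in l for l in lines[-5:])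
--     except:
--         return False
-- ===== Notes on version B (the rewrite author's own statement) =====
-- stated objective: simpler
-- what changed: Instead of computing the maximum matching index over all lines and comparing it with len(lines)-6, B slices the last five stripped lines and checks membership directly with any(); the no-match ValueError path disappears.
import Mathlib
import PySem

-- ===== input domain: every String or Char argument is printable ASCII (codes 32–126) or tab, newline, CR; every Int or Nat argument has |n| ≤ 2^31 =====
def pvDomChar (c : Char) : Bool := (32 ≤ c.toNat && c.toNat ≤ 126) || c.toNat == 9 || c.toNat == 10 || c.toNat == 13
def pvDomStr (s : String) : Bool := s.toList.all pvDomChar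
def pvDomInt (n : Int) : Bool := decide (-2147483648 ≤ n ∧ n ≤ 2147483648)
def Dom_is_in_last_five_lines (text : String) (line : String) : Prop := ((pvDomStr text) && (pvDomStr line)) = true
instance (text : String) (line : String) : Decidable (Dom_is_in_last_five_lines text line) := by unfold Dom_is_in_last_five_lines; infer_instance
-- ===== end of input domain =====

-- B replaces A's global max-matching-index scan plus range comparison with a direct
-- any() membership check over the 5-line tail slice (objective: simpler; return value only).

-- ===== PORT A =====
def is_in_last_five_lines (text : String) (line : String) : Bool :=
  -- lines = text.split('\n'); lines = [l.strip() for l in lines if len(l) > 0]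
  let lines := (((PySem.Str.split? text "\n").getD []).filter (fun l => decide (0 < PySem.Str.len l))).map PySem.Str.strip
  -- line_index = max([i for i, l in enumerate(lines) if line in l])  (ValueError on empty → except → False)
  match PySem.List.max? (((PySem.List.enumerate lines 0).filter (fun p => PySem.Str.isIn line p.2)).map (·.1)) (fun i => i) with
  | none => false
  | some line_index => decide ((lines.length : Int) - 6 < line_index)

-- ===== PORT B =====
def is_in_last_five_lines_alt (text : String) (line : String) : Bool :=
  let lines := (((PySem.Str.split? text "\n").getD []).filter (fun l => decide (0 < PySem.Str.len l))).map PySem.Str.strip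
  (PySem.List.slice lines (some (-5)) none).any (fun l => PySem.Str.isIn line l)

-- ===== PRECONDITION & SPEC =====
def Spec_is_in_last_five_lines (text : String) (line : String) (out : Bool) : Prop := out = is_in_last_five_lines_alt text line
instance (text : String) (line : String) (out : Bool) : Decidable (Spec_is_in_last_five_lines text line out) := by unfold Spec_is_in_last_five_lines; infer_instance

-- ===== CLAIM (what is proved, stated in full; the proofs are below) =====
def Claim_equal_is_in_last_five_lines : Prop := ∀ (text : String) (line : String), Dom_is_in_last_five_lines text line → Spec_is_in_last_five_lines text line (is_in_last_five_lines text line)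

-- ===== LEMMAS AND PROOFS =====

-- core equivalence on an arbitrary list of (stripped) lines
theorem mem_matchIdx_iff (L : List String) (f : String → Bool) (m : Int) :
    m ∈ (((PySem.List.enumerate L 0).filter (fun p => f p.2)).map (·.1)) ↔
      ∃ (k : Nat) (_ : k < L.length), m = (k : Int) ∧ f L[k] = true := by
  simp only [List.mem_map, List.mem_filter, PySem.List.mem_enumerate_iff]
  constructor
  · rintro ⟨⟨i, x⟩, ⟨⟨k, hk, hp⟩, hf⟩, rfl⟩
    cases hp
    exact ⟨k, hk, by simp, by simpa using hf⟩
  · rintro ⟨k, hk, rfl, hf⟩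
    exact ⟨((k : Int), L[k]), ⟨⟨k, hk, by simp⟩, hf⟩, rfl⟩

theorem any_drop_iff (L : List String) (f : String → Bool) (d : Nat) :
    (L.drop d).any f = true ↔ ∃ (k : Nat) (_ : k < L.length), d ≤ k ∧ f L[k] = true := by
  simp only [List.any_eq_true, List.mem_iff_getElem, List.length_drop, List.getElem_drop]
  constructor
  · rintro ⟨x, ⟨i, hi, rfl⟩, hf⟩
    exact ⟨d + i, by omega, by omega, hf⟩
  · rintro ⟨k, hk, hd, hf⟩
    exact ⟨L[k], ⟨k - d, by omega, by congr 1; omega⟩, hf⟩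

theorem core_eq (L : List String) (f : String → Bool) :
    (match PySem.List.max? (((PySem.List.enumerate L 0).filter (fun p => f p.2)).map (·.1)) (fun i => i) with
      | none => false
      | some m => decide ((L.length : Int) - 6 < m))
    = (L.drop (L.length - 5)).any f := by
  cases h : PySem.List.max? (((PySem.List.enumerate L 0).filter (fun p => f p.2)).map (·.1)) (fun i => i) with
  | none =>
    rw [PySem.List.max?_eq_none_iff] at h
    simp only []
    symm
    rw [Bool.eq_false_iff]
    intro hany
    obtain ⟨k, hk, _, hf⟩ := (any_drop_iff L f (L.length - 5)).mp hany
    have : (k : Int) ∈ (((PySem.List.enumerate L 0).filter (fun p => f p.2)).map (·.1)) :=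
      (mem_matchIdx_iff L f _).mpr ⟨k, hk, rfl, hf⟩
    simp [h] at this
  | some m =>
    obtain ⟨k, hk, rfl, hf⟩ := (mem_matchIdx_iff L f m).mp (PySem.List.max?_mem h)
    have hmax := PySem.List.max?_isMax h
    simp only []
    rw [Bool.eq_iff_iff, decide_eq_true_iff, any_drop_iff]
    constructor
    · intro hlt
      exact ⟨k, hk, by omega, hf⟩
    · rintro ⟨j, hj, hd, hfj⟩
      have hle : (j : Int) ≤ (k : Int) :=
        hmax _ ((mem_matchIdx_iff L f _).mpr ⟨j, hj, rfl, hfj⟩)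
      omega

theorem is_in_last_five_lines_spec : Claim_equal_is_in_last_five_lines := by
  intro text line _
  unfold Spec_is_in_last_five_lines is_in_last_five_lines is_in_last_five_lines_alt
  simp only [PySem.List.slice_from_neg_ofNat _ 5 (by omega : (1:Nat) < 5)]
  exact core_eq _ _
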